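-- pv_equiv track=rewrite | github.com/ZiyueYang01/VirID | VirID/phytree/tree_taxon.py | long_str
-- ===== SOURCE A (Python) =====
-- def long_str(li):
--     res=''
--     num_rows = len(li)
--     for i in li:
--         if len(i)>11:
--             del i[11:]
--     num_cols = min(len(row) for row in li)
--     result = []
--     for col in range(num_cols):
--         common_element = li[0][col]
--         for row in range(1, num_rows):
--             if li[row][col] != common_element:
--                 return "|".join(result)
--         result.append(common_element)
--     if len(result) < 11:
--         for i in range(11-len(result)):
--             result.append("")
--     res =  "|".join(result)
--     return res
-- ===== SOURCE B (Python) =====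
-- def long_str(li):
--     # same in-place truncation side effect as the original
--     for row in li:
--         del row[11:]
--     # pairwise longest-common-prefix reduction over the rows
--     prefix = list(li[0])
--     for row in li[1:]:
--         prefix = _lcp(prefix, row)
--     # every column was uniform exactly when the reduced prefix spans the shortest row
--     if len(prefix) == min(len(r) for r in li):
--         prefix = prefix + [""] * (11 - len(prefix))
--     return "|".join(prefix)
--
--
-- def _lcp(p, row):
--     out = []
--     for a, b in zip(p, row):
--         if a != b:
--             break
--         out.append(a)
--     return out
-- ===== Notes on version B (the rewrite author's own statement) =====
-- stated objective: alternative
-- what changed: B replaces A's column-major scan with early return by a row-major pairwise reduction: it folds the rows with a longest-common-prefix operation and decides the padding afterwards by comparing the reduced prefix length with the minimum row length.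
import Mathlib
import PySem

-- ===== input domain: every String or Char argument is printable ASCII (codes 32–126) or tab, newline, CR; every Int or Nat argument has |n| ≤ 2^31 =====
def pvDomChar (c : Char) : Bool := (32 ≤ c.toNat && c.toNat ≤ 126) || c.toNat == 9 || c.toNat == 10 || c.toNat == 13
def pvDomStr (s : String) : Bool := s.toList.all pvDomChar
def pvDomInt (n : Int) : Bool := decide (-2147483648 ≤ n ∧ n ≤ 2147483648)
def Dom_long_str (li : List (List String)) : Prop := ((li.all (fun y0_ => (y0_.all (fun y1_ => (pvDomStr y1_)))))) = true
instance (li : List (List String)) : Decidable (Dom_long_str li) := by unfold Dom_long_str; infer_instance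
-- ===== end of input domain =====

-- B replaces A's column-major scan with early return by a row-major fold of the rows under a
-- longest-common-prefix operation, deciding the padding afterwards (alternative, same cost).
-- Python A truncates each row in place (del i[11:]); B performs the same mutation, and the
-- equivalence proved here is about the RETURN value only.

-- ===== PORT A =====
-- the column loop: for col in range(num_cols): compare li[row][col] (rows 1..num_rows-1) with
-- li[0][col]; early return on mismatch, else append; after the loop pad result with "" up to 11.
-- indices row/col are always in range in A, so the total getD form is exact.
def aLoop (li2 : List (List String)) (numRows numCols : Nat) (col : Nat) (result : List String) : String :=
  if col < numCols then
    let common := (li2.getD 0 []).getD col ""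
    if (List.range' 1 (numRows - 1)).all (fun row => ((li2.getD row []).getD col "") == common) then
      aLoop li2 numRows numCols (col + 1) (result ++ [common])
    else PySem.Str.join "|" result
  else PySem.Str.join "|" (result ++ List.replicate (11 - result.length) "")
termination_by numCols - col

def long_str (li : List (List String)) : String :=
  let li2 := li.map (fun r => r.take 11)      -- del i[11:]  (in place in Python)
  match PySem.List.min? (li2.map List.length) (fun x => x) with
  | none => ""                                -- Python: min() raises ValueError here (li = []); outside Pre_
  | some numCols => aLoop li2 li.length numCols 0 []

-- ===== PORT B =====
-- _lcp(p, row): walk zip(p, row), break at the first unequal pair, collect the shared elements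
def cpLoop : List (String × String) → List String
  | [] => []
  | (a, b) :: rest => if a != b then [] else a :: cpLoop rest

def long_str_alt (li : List (List String)) : String :=
  let tr := li.map (fun r => r.take 11)       -- del row[11:]  (in place in Python)
  match tr with
  | [] => ""                                  -- Python: li[0] raises IndexError here (li = []); outside Pre_
  | p0 :: rest =>
    let pfx := rest.foldl (fun p row => cpLoop (p.zip row)) p0
    match PySem.List.min? (tr.map List.length) (fun x => x) with
    | none => ""                              -- unreachable: tr is nonempty
    | some m =>
      if pfx.length = m then
        PySem.Str.join "|" (pfx ++ List.replicate (11 - pfx.length) "")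
      else PySem.Str.join "|" pfx

-- ===== PRECONDITION & SPEC =====
-- Pre_ excludes only the empty list, on which Python A raises ValueError (min() of an empty sequence).
def Pre_long_str (li : List (List String)) : Prop := li ≠ []
instance (li : List (List String)) : Decidable (Pre_long_str li) := by unfold Pre_long_str; infer_instance
def pvWitness_long_str : List (List String) := [["a", "b"], ["a", "c"]]

def Spec_long_str (li : List (List String)) (out : String) : Prop := out = long_str_alt li
instance (li : List (List String)) (out : String) : Decidable (Spec_long_str li out) := by unfold Spec_long_str; infer_instance

-- ===== CLAIM (what is proved, stated in full; the proofs are below) =====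
def Claim_equal_long_str : Prop := ∀ (li : List (List String)), Dom_long_str li → Pre_long_str li → Spec_long_str li (long_str li)

-- ===== LEMMAS AND PROOFS =====

-- length of the common prefix of two rows
def pvAgree (r0 r : List String) : Nat := ((r0.zip r).takeWhile (fun pr => pr.1 == pr.2)).length

theorem cpLoop_eq (l : List (String × String)) :
    cpLoop l = (l.takeWhile (fun pr => pr.1 == pr.2)).map Prod.fst := by
  induction l with
  | nil => rfl
  | cons h t ih =>
    obtain ⟨a, b⟩ := h
    by_cases hab : (a == b) = true
    · have := eq_of_beq hab; subst this; simp [cpLoop, ih]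
    · have hne : ¬ a = b := by simpa using hab
      simp [cpLoop, hab, hne]

theorem zip_take_left (a : List String) : ∀ (r : List String) (t : Nat),
    (a.take t).zip r = (a.zip r).take t := by
  induction a with
  | nil => intro r t; simp
  | cons x xs ih =>
    intro r t
    cases r with
    | nil => simp
    | cons y ys =>
      cases t with
      | zero => rfl
      | succ t => simp [List.take_succ_cons, ih ys t]

theorem takeWhile_take (p : String × String → Bool) (l : List (String × String)) :
    ∀ t, (l.take t).takeWhile p = (l.takeWhile p).take t := by
  induction l with
  | nil => intro t; simp
  | cons h rest ih =>
    intro t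
    cases t with
    | zero => simp [List.takeWhile_nil]
    | succ t =>
      by_cases hp : p h = true
      · simp [List.take_succ_cons, hp, ih t]
      · simp [List.take_succ_cons, hp]

theorem mapfst_takeWhile (r0 : List String) : ∀ (r : List String),
    ((r0.zip r).takeWhile (fun pr => pr.1 == pr.2)).map Prod.fst = r0.take (pvAgree r0 r) := by
  induction r0 with
  | nil => intro r; simp [pvAgree]
  | cons a as ih =>
    intro r
    cases r with
    | nil => simp [pvAgree]
    | cons b bs =>
      by_cases hab : (a == b) = true
      · simp [pvAgree, hab, List.take_succ_cons, ih bs]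
      · simp [pvAgree, hab]

-- the _lcp step on a prefix of r0
theorem cp_step (r0 r : List String) (t : Nat) :
    cpLoop ((r0.take t).zip r) = r0.take (min t (pvAgree r0 r)) := by
  rw [cpLoop_eq, zip_take_left, takeWhile_take, List.map_take, mapfst_takeWhile,
      List.take_take, Nat.min_comm]

-- the whole fold
theorem cp_fold (r0 : List String) : ∀ (rs : List (List String)) (t : Nat),
    rs.foldl (fun p row => cpLoop (p.zip row)) (r0.take t)
      = r0.take (rs.foldl (fun acc r => min acc (pvAgree r0 r)) t) := by
  intro rs
  induction rs with
  | nil => intro t; rfl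
  | cons r rest ih =>
    intro t
    simp only [List.foldl_cons]
    rw [cp_step, ih]

theorem agree_le (r0 : List String) : ∀ r, pvAgree r0 r ≤ r0.length ∧ pvAgree r0 r ≤ r.length := by
  intro r
  have h1 : pvAgree r0 r ≤ (r0.zip r).length := (List.takeWhile_sublist _).length_le
  have h2 : (r0.zip r).length = min r0.length r.length := List.length_zip
  omega

theorem agree_eq (r0 : List String) : ∀ (r : List String) (c : Nat), c < pvAgree r0 r →
    r0.getD c "" = r.getD c "" := by
  induction r0 with
  | nil => intro r c h; simp [pvAgree] at h
  | cons a as ih =>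
    intro r c h
    cases r with
    | nil => simp [pvAgree] at h
    | cons b bs =>
      by_cases hab : (a == b) = true
      · cases c with
        | zero => simpa using hab
        | succ c =>
          have h' : c < pvAgree as bs := by
            simp only [pvAgree, List.zip_cons_cons, List.takeWhile_cons, hab, if_true,
              List.length_cons] at h
            simp only [pvAgree]; omega
          simpa using ih bs c h'
      · simp [pvAgree, hab] at h

theorem agree_ne (r0 : List String) : ∀ (r : List String),
    pvAgree r0 r < r0.length → pvAgree r0 r < r.length →
    r0.getD (pvAgree r0 r) "" ≠ r.getD (pvAgree r0 r) "" := by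
  induction r0 with
  | nil => intro r h _; simp at h
  | cons a as ih =>
    intro r h1 h2
    cases r with
    | nil => simp at h2
    | cons b bs =>
      by_cases hab : (a == b) = true
      · have he : pvAgree (a :: as) (b :: bs) = pvAgree as bs + 1 := by
          simp [pvAgree, hab]
        rw [he] at h1 h2 ⊢
        simpa using ih bs (by simpa using h1) (by simpa using h2)
      · have he : pvAgree (a :: as) (b :: bs) = 0 := by
          simp [pvAgree, hab]
        rw [he]
        simpa using hab
  
-- facts about the fold of min
theorem foldl_min_facts (g : List String → Nat) : ∀ (rs : List (List String)) (t : Nat),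
    rs.foldl (fun acc r => min acc (g r)) t ≤ t ∧
    (∀ r ∈ rs, rs.foldl (fun acc r => min acc (g r)) t ≤ g r) ∧
    (rs.foldl (fun acc r => min acc (g r)) t = t ∨
      ∃ r ∈ rs, rs.foldl (fun acc r => min acc (g r)) t = g r) := by
  intro rs
  induction rs with
  | nil => intro t; simp
  | cons r rest ih =>
    intro t
    obtain ⟨h1, h2, h3⟩ := ih (min t (g r))
    simp only [List.foldl_cons]
    refine ⟨by omega, ?_, ?_⟩
    · intro x hx
      rcases List.mem_cons.mp hx with rfl | hx
      · omega
      · exact h2 x hx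
    · rcases h3 with h | ⟨x, hx, hh⟩
      · rcases Nat.le_total t (g r) with hle | hle
        · left; omega
        · right; exact ⟨r, List.mem_cons_self, by omega⟩
      · right; exact ⟨x, List.mem_cons.mpr (Or.inr hx), hh⟩

-- characterization of the length of takeWhile over range'
theorem range'_takeWhile_facts (p : Nat → Bool) : ∀ (j col : Nat),
    ((List.range' col j).takeWhile p).length ≤ j ∧
    (∀ i < ((List.range' col j).takeWhile p).length, p (col + i) = true) ∧
    (((List.range' col j).takeWhile p).length = j ∨
      p (col + ((List.range' col j).takeWhile p).length) = false) := by
  intro j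
  induction j with
  | zero => intro col; simp
  | succ j ih =>
    intro col
    obtain ⟨h1, h2, h3⟩ := ih (col + 1)
    rw [List.range'_succ]
    by_cases hp : p col = true
    · simp only [List.takeWhile_cons, hp, if_true, List.length_cons]
      refine ⟨by omega, ?_, ?_⟩
      · intro i hi
        cases i with
        | zero => simpa using hp
        | succ i =>
          have := h2 i (by omega)
          simpa [Nat.add_assoc, Nat.add_comm 1 i] using this
      · rcases h3 with h | h
        · left; omega
        · right; rw [show col + (((List.range' (col+1) j).takeWhile p).length + 1)
            = col + 1 + ((List.range' (col+1) j).takeWhile p).length by omega]; exact h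
    · simp only [List.takeWhile_cons, hp]
      simp [hp]

-- takeWhile of a range' is an initial range'
theorem takeWhile_range' (p : Nat → Bool) : ∀ (j col : Nat),
    (List.range' col j).takeWhile p = List.range' col ((List.range' col j).takeWhile p).length := by
  intro j
  induction j with
  | zero => intro col; simp
  | succ j ih =>
    intro col
    rw [List.range'_succ]
    by_cases hp : p col = true
    · simp only [List.takeWhile_cons, hp, if_true, List.length_cons, List.range'_succ]
      rw [← ih (col + 1)]
    · simp [hp]

theorem map_getD_range' (r0 : List String) : ∀ (k col : Nat), col + k ≤ r0.length →
    (List.range' col k).map (fun c => r0.getD c "") = (r0.drop col).take k := by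
  intro k
  induction k with
  | zero => intro col _; simp
  | succ k ih =>
    intro col hle
    rw [List.range'_succ, List.map_cons, ih (col + 1) (by omega)]
    have hcol : col < r0.length := by omega
    have hget : r0.getD col "" = r0[col] := by
      simp [List.getD, List.getElem?_eq_getElem hcol]
    rw [hget, List.drop_eq_getElem_cons hcol, List.take_succ_cons]

-- A's inner row loop over indices k..k+len-1 is the all-quantifier over the rows big.drop k
theorem range_all_getD (p : List String → Bool) (d : List String) :
    ∀ (rs : List (List String)) (k : Nat) (big : List (List String)), big.drop k = rs →
    ((List.range' k rs.length).all (fun i => p (big.getD i d)) = rs.all p) := by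
  intro rs
  induction rs with
  | nil => intro k big h; simp
  | cons a t ih =>
    intro k big h
    have hget : big.getD k d = a := by
      have : big[k]? = some a := by
        have := @List.getElem?_drop _ big k 0
        rw [h] at this; simpa using this.symm
      simp [List.getD, this]
    have hdrop : big.drop (k+1) = t := by
      have : List.drop 1 (List.drop k big) = List.drop (k+1) big := by
        simp [List.drop_drop]
      rw [← this, h]; rfl
    rw [List.length_cons, List.range'_succ, List.all_cons, List.all_cons, hget,
        ih (k+1) big hdrop]

-- A's column loop, characterized by the takeWhile of the uniform-column predicate
theorem aLoop_char (r0 : List String) (rs : List (List String)) (m : Nat) :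
    ∀ (j col : Nat) (result : List String), col + j = m →
    aLoop (r0 :: rs) (rs.length + 1) m col result =
      (let cols := (List.range' col j).takeWhile
          (fun c => rs.all (fun r => r.getD c "" == r0.getD c ""));
       let res := result ++ cols.map (fun c => r0.getD c "");
       if cols.length = j then
         PySem.Str.join "|" (res ++ List.replicate (11 - res.length) "")
       else PySem.Str.join "|" res) := by
  intro j
  induction j with
  | zero =>
    intro col result hcol
    rw [aLoop]
    have : ¬ col < m := by omega
    simp [this]
  | succ j ih =>
    intro col result hcol
    have hlt : col < m := by omega
    rw [aLoop]
    simp only [hlt, if_true]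
    have hcommon : ((r0 :: rs).getD 0 []).getD col "" = r0.getD col "" := rfl
    have hinner : (List.range' 1 ((rs.length + 1) - 1)).all
        (fun row => (((r0 :: rs).getD row []).getD col "") == (r0.getD col ""))
        = rs.all (fun r => r.getD col "" == r0.getD col "") := by
      have h1 : (rs.length + 1) - 1 = rs.length := by omega
      rw [h1]
      exact range_all_getD (fun r => r.getD col "" == r0.getD col "") [] rs 1 (r0 :: rs) rfl
    rw [hcommon, hinner, List.range'_succ]
    by_cases hu : rs.all (fun r => r.getD col "" == r0.getD col "") = true
    · rw [if_pos hu, ih (col + 1) (result ++ [r0.getD col ""]) (by omega)]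
      simp only [List.takeWhile_cons, hu, if_true, List.length_cons, List.map_cons]
      have happ : result ++ [r0.getD col ""]
            ++ ((List.range' (col+1) j).takeWhile
                (fun c => rs.all (fun r => r.getD c "" == r0.getD c ""))).map (fun c => r0.getD c "")
          = result ++ r0.getD col ""
            :: ((List.range' (col+1) j).takeWhile
                (fun c => rs.all (fun r => r.getD c "" == r0.getD c ""))).map (fun c => r0.getD c "") := by
        simp
      rw [happ]
      have hlen : (((List.range' (col+1) j).takeWhile
          (fun c => rs.all (fun r => r.getD c "" == r0.getD c ""))).length = j)
          ↔ (((List.range' (col+1) j).takeWhile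
          (fun c => rs.all (fun r => r.getD c "" == r0.getD c ""))).length + 1 = j + 1) := by omega
      by_cases hl : ((List.range' (col+1) j).takeWhile
          (fun c => rs.all (fun r => r.getD c "" == r0.getD c ""))).length = j
      · rw [if_pos hl, if_pos (hlen.mp hl)]
      · rw [if_neg hl, if_neg (fun h => hl (by omega))]
    · rw [if_neg hu]
      simp only [List.takeWhile_cons, hu]
      simp

-- ===== VERDICT (by name: the statement is the Claim_ definition above) =====
theorem long_str_spec : Claim_equal_long_str := by
  intro li _ hPre
  unfold Spec_long_str
  obtain ⟨a, t, rfl⟩ : ∃ a t, li = a :: t := by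
    cases li with
    | nil => exact absurd rfl hPre
    | cons a t => exact ⟨a, t, rfl⟩
  set r0 : List String := a.take 11 with hr0
  set rs : List (List String) := t.map (fun r => r.take 11) with hrs
  have hli2 : (a :: t).map (fun r => r.take 11) = r0 :: rs := rfl
  obtain ⟨m, hm⟩ : ∃ m, PySem.List.min? (((a :: t).map (fun r => r.take 11)).map List.length) (fun x => x) = some m := by
    cases h : PySem.List.min? (((a :: t).map (fun r => r.take 11)).map List.length) (fun x => x) with
    | none => rw [PySem.List.min?_eq_none_iff] at h; simp at h
    | some v => exact ⟨v, rfl⟩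
  rw [hli2] at hm
  have hmin : ∀ r ∈ r0 :: rs, m ≤ r.length := by
    intro r hr
    exact PySem.List.min?_isMin hm _ (List.mem_map.mpr ⟨r, hr, rfl⟩)
  have hex : ∃ r ∈ r0 :: rs, r.length = m := by
    obtain ⟨y, hy, hyl⟩ := List.mem_map.mp (PySem.List.min?_mem hm)
    exact ⟨y, hy, hyl⟩
  have hr0m : m ≤ r0.length := hmin r0 List.mem_cons_self
  -- the uniform-column prefix length K (A's early-return point)
  set K : Nat := ((List.range' 0 m).takeWhile
      (fun c => rs.all (fun r => r.getD c "" == r0.getD c ""))).length with hK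
  obtain ⟨hK1, hK2, hK3⟩ := range'_takeWhile_facts
      (fun c => rs.all (fun r => r.getD c "" == r0.getD c "")) m 0
  -- the fold-of-min value M (B's reduced prefix length)
  set M : Nat := rs.foldl (fun acc r => min acc (pvAgree r0 r)) r0.length with hM
  obtain ⟨hM1, hM2, hM3⟩ := foldl_min_facts (fun r => pvAgree r0 r) rs r0.length
  have hKleM : K ≤ M := by
    rcases hM3 with h | ⟨r, hr, h⟩
    · omega
    · by_contra hlt
      rw [Nat.not_le] at hlt
      have hag : pvAgree r0 r < K := by omega
      have hrlen := hmin r (List.mem_cons_of_mem _ hr)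
      have h1 : pvAgree r0 r < r0.length := by omega
      have h2 : pvAgree r0 r < r.length := by omega
      have hne := agree_ne r0 r h1 h2
      have hU := hK2 (pvAgree r0 r) hag
      rw [Nat.zero_add] at hU
      simp only [List.all_eq_true] at hU
      exact hne (eq_of_beq (hU r hr)).symm
  have hMleK : M ≤ K := by
    rcases hK3 with h | h
    · obtain ⟨row, hrow, hlen⟩ := hex
      rcases List.mem_cons.mp hrow with rfl | hmem
      · omega
      · have h1 := hM2 row hmem
        have h2 := (agree_le r0 row).2
        omega
    · rw [Nat.zero_add] at h
      obtain ⟨r, hr, hpr⟩ := List.all_eq_false.mp h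
      have hne : r.getD K "" ≠ r0.getD K "" := by simpa using hpr
      have hag : pvAgree r0 r ≤ K := by
        by_contra hlt
        rw [Nat.not_le] at hlt
        exact hne (agree_eq r0 r K hlt).symm
      have := hM2 r hr
      omega
  have hMK : M = K := le_antisymm hMleK hKleM
  -- A's side: the column loop reduces to the K-characterized expression
  have hchar := aLoop_char r0 rs m m 0 [] (by omega)
  have hA : long_str (a :: t) = aLoop (r0 :: rs) (rs.length + 1) m 0 [] := by
    simp only [long_str, hli2, hm]
    have : (a :: t).length = rs.length + 1 := by simp [hrs]
    rw [this]
  have hcols : (List.range' 0 m).takeWhile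
      (fun c => rs.all (fun r => r.getD c "" == r0.getD c "")) = List.range' 0 K := by
    rw [takeWhile_range']
  have hmap : (List.range' 0 K).map (fun c => r0.getD c "") = r0.take K := by
    rw [map_getD_range' r0 K 0 (by omega)]
    simp
  have hAval : long_str (a :: t) =
      (if K = m then
        PySem.Str.join "|" (r0.take K ++ List.replicate (11 - (r0.take K).length) "")
      else PySem.Str.join "|" (r0.take K)) := by
    rw [hA, hchar]
    simp only [hcols, hmap, List.nil_append, List.length_range']
  -- B's side: the fold reduces to r0.take M
  have hfold : rs.foldl (fun p row => cpLoop (p.zip row)) r0 = r0.take M := by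
    conv_lhs => rw [show r0 = r0.take r0.length from List.take_length.symm]
    rw [cp_fold]
  have hplen : (r0.take M).length = M := by
    rw [List.length_take]; omega
  have hBval : long_str_alt (a :: t) =
      (if M = m then
        PySem.Str.join "|" (r0.take M ++ List.replicate (11 - (r0.take M).length) "")
      else PySem.Str.join "|" (r0.take M)) := by
    simp only [long_str_alt, hli2, hm, hfold, hplen]
  rw [hAval, hBval, hMK]
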